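-- pv_equiv track=rewrite | github.com/2Hasan2/Every-Day-problem | ICPC/002/Long_Sequence.py | long_sequence
-- ===== SOURCE A (Python) =====
-- def long_sequence(N, B, rep):
--     MAX_VALUE = sum(B)
--     full_periods, remaining = divmod(rep, MAX_VALUE)
--     min_value = full_periods * N
--
--     for num in B:
--         if remaining <= 0:
--             break
--         remaining -= num
--         min_value += 1
--
--     return min_value
-- ===== SOURCE B (Python) =====
-- from itertools import accumulate
-- from bisect import bisect_left
--
-- def long_sequence(N, B, rep):
--     full_periods, remaining = divmod(rep, sum(B))
--     # running maxima of the prefix sums (with leading 0): a nondecreasing list,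
--     # so the first prefix reaching `remaining` can be found by binary search;
--     # the monotonization keeps this exact even if B contains negative entries.
--     peaks = list(accumulate(accumulate(B, initial=0), max))
--     k = bisect_left(peaks, remaining)
--     return full_periods * N + k
-- ===== Notes on version B (the rewrite author's own statement) =====
-- stated objective: alternative
-- what changed: Replaces A's stateful subtract-and-count loop with a monotonized prefix-sum structure: B builds the running maxima of the prefix sums (a sorted array) and locates the answer with bisect_left binary search instead of scanning and mutating a remainder.
import Mathlib
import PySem

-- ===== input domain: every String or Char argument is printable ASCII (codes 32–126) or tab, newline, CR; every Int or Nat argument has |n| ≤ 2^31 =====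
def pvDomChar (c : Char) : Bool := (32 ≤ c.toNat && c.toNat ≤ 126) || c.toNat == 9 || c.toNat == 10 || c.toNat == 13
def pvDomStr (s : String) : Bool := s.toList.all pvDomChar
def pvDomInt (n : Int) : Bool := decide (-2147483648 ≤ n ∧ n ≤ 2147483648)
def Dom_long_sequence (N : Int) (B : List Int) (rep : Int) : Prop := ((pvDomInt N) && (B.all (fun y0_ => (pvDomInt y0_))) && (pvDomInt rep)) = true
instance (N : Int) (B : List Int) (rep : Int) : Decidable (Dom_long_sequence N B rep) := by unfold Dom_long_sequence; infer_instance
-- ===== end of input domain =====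

-- B replaces A's subtract-and-count loop by running maxima of prefix sums + bisect_left binary search: same result, different algorithm.

-- ===== PORT A =====
-- A's for-loop: state (remaining, min_value), break when remaining ≤ 0
def pvLoopA : List Int → Int → Int → Int
  | [], _, mv => mv
  | num :: ns, remaining, mv =>
      if remaining ≤ 0 then mv else pvLoopA ns (remaining - num) (mv + 1)

def long_sequence (N : Int) (B : List Int) (rep : Int) : Int :=
  let MAX_VALUE := B.sum
  let fr := (PySem.Int.divmod? rep MAX_VALUE).getD (0, 0)  -- none (sum = 0) excluded by Pre_
  pvLoopA B fr.2 (fr.1 * N)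

-- ===== PORT B =====
-- bisect.bisect_left on a NONDECREASING list (the only way Source B calls it: peaks is a
-- running maximum): leftmost insertion point = number of leading elements < x; exact there.
def pyBisectLeft (m : List Int) (x : Int) : Nat :=
  (m.takeWhile (fun s => decide (s < x))).length

def long_sequence_alt (N : Int) (B : List Int) (rep : Int) : Int :=
  let fr := (PySem.Int.divmod? rep B.sum).getD (0, 0)      -- none (sum = 0) excluded by Pre_
  let pre := List.scanl (fun a b => a + b) 0 B              -- accumulate(B, initial=0)
  let peaks := match pre with                               -- accumulate(pre, max)
    | [] => ([] : List Int)
    | p :: ps => List.scanl max p ps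
  fr.1 * N + ((pyBisectLeft peaks fr.2 : Nat) : Int)

-- ===== PRECONDITION & SPEC =====
-- Pre_ excludes exactly sum(B) = 0, where A's divmod raises ZeroDivisionError (B raises there too).
def Pre_long_sequence (N : Int) (B : List Int) (rep : Int) : Prop := B.sum ≠ 0
instance (N : Int) (B : List Int) (rep : Int) : Decidable (Pre_long_sequence N B rep) := by unfold Pre_long_sequence; infer_instance
def pvWitness_long_sequence : Int × List Int × Int := (3, [1, 2, 4], 25)

def Spec_long_sequence (N : Int) (B : List Int) (rep : Int) (out : Int) : Prop := out = long_sequence_alt N B rep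
instance (N : Int) (B : List Int) (rep : Int) (out : Int) : Decidable (Spec_long_sequence N B rep out) := by unfold Spec_long_sequence; infer_instance

-- ===== CLAIM (what is proved, stated in full; the proofs are below) =====
def Claim_equal_long_sequence : Prop := ∀ (N : Int) (B : List Int) (rep : Int), Dom_long_sequence N B rep → Pre_long_sequence N B rep → Spec_long_sequence N B rep (long_sequence N B rep)

-- ===== LEMMAS AND PROOFS =====

-- manual equation lemmas for A's loop
theorem pvLoopA_nil (r mv : Int) : pvLoopA [] r mv = mv := rfl
theorem pvLoopA_cons (x : Int) (xs : List Int) (r mv : Int) :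
    pvLoopA (x :: xs) r mv = if r ≤ 0 then mv else pvLoopA xs (r - x) (mv + 1) := rfl

-- the loop counter is an additive accumulator
theorem loopA_acc (l : List Int) : ∀ (r mv : Int), pvLoopA l r mv = mv + pvLoopA l r 0 := by
  induction l with
  | nil => intro r mv; simp [pvLoopA_nil]
  | cons x xs ih =>
      intro r mv
      rw [pvLoopA_cons, pvLoopA_cons]
      by_cases h : r ≤ 0
      · simp [h]
      · rw [if_neg h, if_neg h, ih (r - x) (mv + 1), ih (r - x) (0 + 1)]
        ring

-- a running-max list whose seed already reaches rem contributes nothing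
theorem takeWhile_scanl_max_nil (c rem : Int) (t : List Int) (h : ¬ c < rem) :
    (List.scanl max c t).takeWhile (fun s => decide (s < rem)) = [] := by
  cases t <;> simp [List.scanl_nil, List.scanl_cons, h]

-- core invariant: with current prefix sum a and current running maximum c (< rem), the
-- leading segment of the running-max list below rem counts 1 (for c itself) plus the
-- number of elements A's loop still consumes, provided a hit exists at or beyond a.
theorem peaks_takeWhile (l : List Int) : ∀ (c a rem : Int), c < rem →
    (rem ≤ a + l.sum ∨ rem ≤ a) →
    (((List.scanl max c (List.scanl (fun x y => x + y) a l)).takeWhile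
        (fun s => decide (s < rem))).length : Int)
      = 1 + pvLoopA l (rem - a) 0 := by
  induction l with
  | nil =>
      intro c a rem hc hex
      have ha : rem ≤ a := by rcases hex with h | h <;> simp_all
      have h1 : ¬ (max c a < rem) := by
        have : a ≤ max c a := le_max_right c a
        omega
      simp [List.scanl_nil, List.scanl_cons, hc, h1, pvLoopA_nil]
  | cons x xs ih =>
      intro c a rem hc hex
      simp only [List.scanl_cons, List.takeWhile_cons, decide_eq_true hc, if_pos,
        List.length_cons]
      by_cases ha : rem ≤ a
      · -- the loop breaks at once; the inner running max is already ≥ rem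
        have h1 : ¬ (max c a < rem) := by
          have : a ≤ max c a := le_max_right c a
          omega
        rw [takeWhile_scanl_max_nil _ _ _ h1]
        have hloop : pvLoopA (x :: xs) (rem - a) 0 = 0 := by
          rw [pvLoopA_cons, if_pos (by omega)]
        simp [hloop]
      · -- the loop consumes x; recurse with running max (max c a) and prefix sum a + x
        have hc' : max c a < rem := by
          simp only [max_lt_iff]; omega
        have hex' : rem ≤ (a + x) + xs.sum ∨ rem ≤ a + x := by
          rcases hex with h | h
          · left; simp only [List.sum_cons] at h; omega
          · omega
        have hkey := ih (max c a) (a + x) rem hc' hex'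
        have hloop : pvLoopA (x :: xs) (rem - a) 0 = 1 + pvLoopA xs (rem - (a + x)) 0 := by
          rw [pvLoopA_cons, if_neg (by omega), loopA_acc xs (rem - a - x) (0 + 1),
            show rem - a - x = rem - (a + x) by ring]
          ring
        rw [hloop]
        push_cast
        push_cast at hkey
        omega

-- ===== VERDICT (by name: the statement is the Claim_ definition above) =====
theorem long_sequence_spec : Claim_equal_long_sequence := by
  intro N B rep _ hpre
  unfold Pre_long_sequence at hpre
  unfold Spec_long_sequence long_sequence long_sequence_alt
  have hdm : (PySem.Int.divmod? rep B.sum).getD (0, 0)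
      = (PySem.Int.floordiv rep B.sum, PySem.Int.mod rep B.sum) := by
    simp [PySem.Int.divmod?, PySem.Int.floordiv, PySem.Int.mod, hpre]
  dsimp only
  rw [hdm]
  cases B with
  | nil => exact absurd rfl hpre
  | cons x xs =>
      set q := PySem.Int.floordiv rep (x :: xs).sum with hq
      set r := PySem.Int.mod rep (x :: xs).sum with hr
      simp only [List.scanl_cons]
      unfold pyBisectLeft
      by_cases h0 : r ≤ 0
      · rw [takeWhile_scanl_max_nil 0 r _ (by omega), pvLoopA_cons, if_pos h0]
        simp
      · have hpos : 0 < (x :: xs).sum := by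
          rcases lt_trichotomy ((x :: xs).sum) 0 with hlt | heq | hgt
          · have := PySem.Int.mod_neg_bounds (a := rep) hlt
            rw [← hr] at this; omega
          · exact absurd heq hpre
          · exact hgt
        have hlt : r < (x :: xs).sum := by
          have := PySem.Int.mod_lt (a := rep) hpos
          rw [← hr] at this; exact this
        have hkey := peaks_takeWhile xs 0 x r (by omega)
          (by left; simp only [List.sum_cons] at hlt; omega)
        rw [loopA_acc (x :: xs) r (q * N), pvLoopA_cons, if_neg h0,
          loopA_acc xs (r - x) (0 + 1)]
        rw [show (0 : Int) + x = x by ring]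
        rw [hkey]
        ring
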